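-- pv_equiv track=rewrite | github.com/JBEI/prpr | prpr_commands.py | CheckCommand
-- ===== SOURCE A (Python) =====
-- def CheckCommand(command):
--     """
--     Returns the command type and the generic command, if the command exists.
--     """
--     commandList = {
--         'definition' : {
--             'name'          : ['NAME'],
--             'table'         : ['TABLE'],
--             '"""'           : ['"""', '"""""', '""""""', '"""""""', '""""""""','DOC', 'ENDDOC'],
--             'plate'         : ['PLATE'],
--             'component'     : ['COMPONENT', 'REAGENT', 'LOCATION'],
--             'volume'        : ['VOLUME', 'AMOUNT'],
--             'recipe'        : ['RECIPE', 'LIST', 'SET'],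
--             'comment'       : ['COMMENT', '%']
--         },
--         'action' : {
--             'use'           : ['USE'],
--             'make'          : ['MAKE', 'PREPARE_LIST'],
--             'spread'        : ['SPREAD', 'DISTRIBUTE', 'DIST_REAGENT'],
--             'transfer'      : ['TRANSFER', 'TRANSFER_LOCATIONS'],
--             'message'       : ['MESSAGE', 'PROMPT'],
--             'move'          : ['MOVE'],
--             'wait'          : ['WAIT']
--         },
--         'function' : {
--             'protocol'      : ['TEMPLATE', 'PROTOCOL'],
--             'endprotocol'   : ['ENDTEMPLATE', 'ENDPROTOCOL']
--         }
--     }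
--
--     for type in commandList.keys():
--         for keyword in commandList[type].keys():
--             if command.upper() in commandList[type][keyword]:
--                 return { 'type' : type, 'name' : keyword }
-- ===== SOURCE B (Python) =====
-- # B: one flat keyword -> (type, name) dict built once at module level; a single
-- # lookup replaces A's nested scans over the grouped table.
-- _KEYWORDS = {
--     'NAME': ('definition', 'name'),
--     'TABLE': ('definition', 'table'),
--     '"""': ('definition', '"""'),
--     '"""""': ('definition', '"""'),
--     '""""""': ('definition', '"""'),
--     '"""""""': ('definition', '"""'),
--     '""""""""': ('definition', '"""'),
--     'DOC': ('definition', '"""'),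
--     'ENDDOC': ('definition', '"""'),
--     'PLATE': ('definition', 'plate'),
--     'COMPONENT': ('definition', 'component'),
--     'REAGENT': ('definition', 'component'),
--     'LOCATION': ('definition', 'component'),
--     'VOLUME': ('definition', 'volume'),
--     'AMOUNT': ('definition', 'volume'),
--     'RECIPE': ('definition', 'recipe'),
--     'LIST': ('definition', 'recipe'),
--     'SET': ('definition', 'recipe'),
--     'COMMENT': ('definition', 'comment'),
--     '%': ('definition', 'comment'),
--     'USE': ('action', 'use'),
--     'MAKE': ('action', 'make'),
--     'PREPARE_LIST': ('action', 'make'),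
--     'SPREAD': ('action', 'spread'),
--     'DISTRIBUTE': ('action', 'spread'),
--     'DIST_REAGENT': ('action', 'spread'),
--     'TRANSFER': ('action', 'transfer'),
--     'TRANSFER_LOCATIONS': ('action', 'transfer'),
--     'MESSAGE': ('action', 'message'),
--     'PROMPT': ('action', 'message'),
--     'MOVE': ('action', 'move'),
--     'WAIT': ('action', 'wait'),
--     'TEMPLATE': ('function', 'protocol'),
--     'PROTOCOL': ('function', 'protocol'),
--     'ENDTEMPLATE': ('function', 'endprotocol'),
--     'ENDPROTOCOL': ('function', 'endprotocol'),
-- }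
--
-- def CheckCommand(command):
--     hit = _KEYWORDS.get(command.upper())
--     if hit is not None:
--         return {'type': hit[0], 'name': hit[1]}
-- ===== Notes on version B (the rewrite author's own statement) =====
-- stated objective: simpler
-- what changed: Replaced the two nested loops over a nested dict-of-dicts-of-lists with a single .get lookup of command.upper() in one flat keyword->(type,name) dict built once at module level.
import Mathlib
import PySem

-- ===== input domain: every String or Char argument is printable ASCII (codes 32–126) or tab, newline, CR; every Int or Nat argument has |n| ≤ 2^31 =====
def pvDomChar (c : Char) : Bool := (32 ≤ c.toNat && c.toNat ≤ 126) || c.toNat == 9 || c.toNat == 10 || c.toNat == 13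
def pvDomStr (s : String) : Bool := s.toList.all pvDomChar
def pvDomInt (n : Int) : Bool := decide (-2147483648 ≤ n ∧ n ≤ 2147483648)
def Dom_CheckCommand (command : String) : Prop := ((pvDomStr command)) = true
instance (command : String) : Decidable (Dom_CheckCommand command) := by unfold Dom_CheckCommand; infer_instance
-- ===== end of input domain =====

-- B replaces A's two nested loops over a grouped table by one lookup in a flat
-- keyword -> (type, name) dict (objective: simpler).

-- ===== PORT A =====
-- A's nested dict-of-dicts-of-lists, as an insertion-ordered association structure.
def pvTableA : List (String × List (String × List String)) :=
  [ ("definition",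
      [ ("name", ["NAME"]),
        ("table", ["TABLE"]),
        ("\"\"\"", ["\"\"\"", "\"\"\"\"\"", "\"\"\"\"\"\"", "\"\"\"\"\"\"\"", "\"\"\"\"\"\"\"\"", "DOC", "ENDDOC"]),
        ("plate", ["PLATE"]),
        ("component", ["COMPONENT", "REAGENT", "LOCATION"]),
        ("volume", ["VOLUME", "AMOUNT"]),
        ("recipe", ["RECIPE", "LIST", "SET"]),
        ("comment", ["COMMENT", "%"]) ]),
    ("action",
      [ ("use", ["USE"]),
        ("make", ["MAKE", "PREPARE_LIST"]),
        ("spread", ["SPREAD", "DISTRIBUTE", "DIST_REAGENT"]),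
        ("transfer", ["TRANSFER", "TRANSFER_LOCATIONS"]),
        ("message", ["MESSAGE", "PROMPT"]),
        ("move", ["MOVE"]),
        ("wait", ["WAIT"]) ]),
    ("function",
      [ ("protocol", ["TEMPLATE", "PROTOCOL"]),
        ("endprotocol", ["ENDTEMPLATE", "ENDPROTOCOL"]) ]) ]

-- inner 'for keyword in commandList[type].keys(): if command.upper() in …: return …'
def pvScanGroups (u : String) (ty : String) :
    List (String × List String) → Option (List (String × String))
  | [] => none
  | (kw, kws) :: rest =>
      if u ∈ kws then some [("type", ty), ("name", kw)]
      else pvScanGroups u ty rest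

-- outer 'for type in commandList.keys(): …' (falls through to None)
def pvScanTypes (u : String) :
    List (String × List (String × List String)) → Option (List (String × String))
  | [] => none
  | (ty, groups) :: rest =>
      match pvScanGroups u ty groups with
      | some r => some r
      | none => pvScanTypes u rest

def CheckCommand (command : String) : Option (List (String × String)) :=
  pvScanTypes (PySem.Str.upper command) pvTableA

-- ===== PORT B =====
-- Source B's module-level flat dict literal _KEYWORDS.
def pvKeywords : PySem.Dict String (String × String) :=
  PySem.Dict.mk
    [ ("NAME", ("definition", "name")), ("TABLE", ("definition", "table")),
      ("\"\"\"", ("definition", "\"\"\"")), ("\"\"\"\"\"", ("definition", "\"\"\"")),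
      ("\"\"\"\"\"\"", ("definition", "\"\"\"")), ("\"\"\"\"\"\"\"", ("definition", "\"\"\"")),
      ("\"\"\"\"\"\"\"\"", ("definition", "\"\"\"")), ("DOC", ("definition", "\"\"\"")),
      ("ENDDOC", ("definition", "\"\"\"")), ("PLATE", ("definition", "plate")),
      ("COMPONENT", ("definition", "component")), ("REAGENT", ("definition", "component")),
      ("LOCATION", ("definition", "component")), ("VOLUME", ("definition", "volume")),
      ("AMOUNT", ("definition", "volume")), ("RECIPE", ("definition", "recipe")),
      ("LIST", ("definition", "recipe")), ("SET", ("definition", "recipe")),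
      ("COMMENT", ("definition", "comment")), ("%", ("definition", "comment")),
      ("USE", ("action", "use")), ("MAKE", ("action", "make")),
      ("PREPARE_LIST", ("action", "make")), ("SPREAD", ("action", "spread")),
      ("DISTRIBUTE", ("action", "spread")), ("DIST_REAGENT", ("action", "spread")),
      ("TRANSFER", ("action", "transfer")), ("TRANSFER_LOCATIONS", ("action", "transfer")),
      ("MESSAGE", ("action", "message")), ("PROMPT", ("action", "message")),
      ("MOVE", ("action", "move")), ("WAIT", ("action", "wait")),
      ("TEMPLATE", ("function", "protocol")), ("PROTOCOL", ("function", "protocol")),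
      ("ENDTEMPLATE", ("function", "endprotocol")), ("ENDPROTOCOL", ("function", "endprotocol")) ]

def CheckCommand_alt (command : String) : Option (List (String × String)) :=
  match pvKeywords.get? (PySem.Str.upper command) with
  | some hit => some [("type", hit.1), ("name", hit.2)]
  | none => none

-- ===== PRECONDITION & SPEC =====
def Spec_CheckCommand (command : String) (out : Option (List (String × String))) : Prop := out = CheckCommand_alt command
instance (command : String) (out : Option (List (String × String))) : Decidable (Spec_CheckCommand command out) := by unfold Spec_CheckCommand; infer_instance

-- ===== CLAIM (what is proved, stated in full; the proofs are below) =====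
def Claim_equal_CheckCommand : Prop := ∀ (command : String), Dom_CheckCommand command → Spec_CheckCommand command (CheckCommand command)

-- ===== LEMMAS AND PROOFS =====

-- the flat keyword list A's nested table denotes
def pvFlatten (T : List (String × List (String × List String))) : List (String × String × String) :=
  T.flatMap fun t => t.2.flatMap fun g => g.2.map fun kw => (kw, t.1, g.1)

theorem pv_get?_mk_nil {ν : Type} (u : String) :
    (PySem.Dict.mk ([] : List (String × ν))).get? u = none := rfl

theorem pv_get?_mk_append {ν : Type} (l1 l2 : List (String × ν)) (u : String) :
    (PySem.Dict.mk (l1 ++ l2)).get? u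
      = ((PySem.Dict.mk l1).get? u).or ((PySem.Dict.mk l2).get? u) := by
  induction l1 with
  | nil => simp [pv_get?_mk_nil]
  | cons p rest ih =>
      obtain ⟨k, v⟩ := p
      simp only [List.cons_append, PySem.Dict.get?_mk_cons, ih]
      by_cases h : k == u <;> simp [h]

theorem pv_get?_mk_kws (u ty kw : String) (kws : List String) :
    (PySem.Dict.mk (kws.map fun w => (w, ty, kw))).get? u
      = if u ∈ kws then some (ty, kw) else none := by
  induction kws with
  | nil => simp [pv_get?_mk_nil]
  | cons w rest ih =>
      simp only [List.map_cons, PySem.Dict.get?_mk_cons, ih, List.mem_cons]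
      by_cases h : w = u
      · subst h; simp
      · have hb : (w == u) = false := by simp [h]
        have h' : ¬u = w := fun hh => h hh.symm
        simp [hb, h']

-- turn a flat-lookup result into A's returned dict
def pvWrap (_ty : String) : Option (String × String) → Option (List (String × String))
  | some p => some [("type", p.1), ("name", p.2)]
  | none => none

theorem pv_scanGroups_eq (u ty : String) (gs : List (String × List String)) :
    pvScanGroups u ty gs
      = pvWrap ty ((PySem.Dict.mk (gs.flatMap fun g => g.2.map fun kw => (kw, ty, g.1))).get? u) := by
  induction gs with
  | nil => simp [pvScanGroups, pv_get?_mk_nil, pvWrap]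
  | cons g rest ih =>
      obtain ⟨kw, kws⟩ := g
      simp only [pvScanGroups, List.flatMap_cons, pv_get?_mk_append, pv_get?_mk_kws, ih]
      by_cases h : u ∈ kws <;> simp [h, pvWrap]

theorem pv_scanTypes_eq (u : String) (T : List (String × List (String × List String))) :
    pvScanTypes u T
      = match (PySem.Dict.mk (pvFlatten T)).get? u with
        | some hit => some [("type", hit.1), ("name", hit.2)]
        | none => none := by
  induction T with
  | nil => simp [pvScanTypes, pvFlatten, pv_get?_mk_nil]
  | cons t rest ih =>
      obtain ⟨ty, groups⟩ := t
      simp only [pvScanTypes, pvFlatten, List.flatMap_cons, pv_get?_mk_append, ih]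
      cases h : pvScanGroups u ty groups with
      | some r => rw [pv_scanGroups_eq] at h
                  cases hl : (PySem.Dict.mk (groups.flatMap fun g => g.2.map fun kw => (kw, ty, g.1))).get? u with
                  | some p => rw [hl] at h; simp [pvWrap] at h; simp [Option.or, ← h]
                  | none => rw [hl] at h; simp [pvWrap] at h
      | none => rw [pv_scanGroups_eq] at h
                cases hl : (PySem.Dict.mk (groups.flatMap fun g => g.2.map fun kw => (kw, ty, g.1))).get? u with
                | some p => rw [hl] at h; simp [pvWrap] at h
                | none => rw [hl] at h; simp [Option.or]

-- B's literal dict is exactly the flattening of A's nested table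
theorem pv_keywords_eq : pvKeywords = PySem.Dict.mk (pvFlatten pvTableA) := rfl

-- ===== VERDICT (by name: the statement is the Claim_ definition above) =====
theorem CheckCommand_spec : Claim_equal_CheckCommand := by
  intro command _
  unfold Spec_CheckCommand CheckCommand CheckCommand_alt
  rw [pv_scanTypes_eq, pv_keywords_eq]
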